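-- pv_equiv track=rewrite | github.com/ben-juodvalkis/Ableton-Device-Creator | archive-v2-scripts/drum-racks/creation/create_multivelocity_drum_rack_v2.py | create_velocity_ranges
-- ===== SOURCE A (Python) =====
-- from typing import Dict, List, Optional, Tuple
--
-- def create_velocity_ranges(velocity_layers: List[Tuple[int, str]]) -> List[Tuple[int, int, str]]:
--     """Create velocity ranges for MultiSampler from sorted velocity layers."""
--     if not velocity_layers:
--         return []
--
--     ranges = []
--     num_layers = len(velocity_layers)
--
--     for i, (velocity, file_path) in enumerate(velocity_layers):
--         if i == 0:
--             if num_layers == 1: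
--                 vel_min, vel_max = 1, 127
--             else:
--                 next_velocity = velocity_layers[i + 1][0]
--                 vel_min = 1
--                 vel_max = (velocity + next_velocity) // 2
--         elif i == num_layers - 1:
--             prev_velocity = velocity_layers[i - 1][0]
--             vel_min = (prev_velocity + velocity) // 2 + 1
--             vel_max = 127
--         else:
--             prev_velocity = velocity_layers[i - 1][0]
--             next_velocity = velocity_layers[i + 1][0]
--             vel_min = (prev_velocity + velocity) // 2 + 1
--             vel_max = (velocity + next_velocity) // 2
--
--         ranges.append((vel_min, vel_max, file_path))
--
--     return ranges
-- ===== SOURCE B (Python) =====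
-- from typing import Dict, List, Optional, Tuple
--
-- def create_velocity_ranges(velocity_layers: List[Tuple[int, str]]) -> List[Tuple[int, int, str]]:
--     """Create velocity ranges for MultiSampler from sorted velocity layers."""
--     def go(vel_min, layers):
--         (velocity, file_path) = layers[0]
--         rest = layers[1:]
--         if not rest:
--             return [(vel_min, 127, file_path)]
--         mid = (velocity + rest[0][0]) // 2
--         return [(vel_min, mid, file_path)] + go(mid + 1, rest)
--     return go(1, velocity_layers) if velocity_layers else []
-- ===== Notes on version B (the rewrite author's own statement) =====
-- stated objective: alternative
-- what changed: Replaces A's indexed loop with three-way first/last/middle branching and neighbour lookups by a structural recursion over the list that carries the next lower bound (previous midpoint + 1) as an accumulator, so no indexing and no boundary branches are needed.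
import Mathlib
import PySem

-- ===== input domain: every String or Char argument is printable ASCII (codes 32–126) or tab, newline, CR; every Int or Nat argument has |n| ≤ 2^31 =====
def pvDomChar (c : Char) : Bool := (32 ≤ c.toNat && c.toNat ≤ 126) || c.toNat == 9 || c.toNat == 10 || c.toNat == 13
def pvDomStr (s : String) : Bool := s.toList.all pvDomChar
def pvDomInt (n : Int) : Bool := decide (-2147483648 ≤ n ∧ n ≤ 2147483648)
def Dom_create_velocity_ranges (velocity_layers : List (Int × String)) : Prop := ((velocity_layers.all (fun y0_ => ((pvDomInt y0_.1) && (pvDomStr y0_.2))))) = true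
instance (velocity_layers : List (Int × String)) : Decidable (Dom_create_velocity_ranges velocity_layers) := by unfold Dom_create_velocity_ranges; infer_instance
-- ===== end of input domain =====

-- B replaces A's indexed loop with first/last/middle branching by a structural recursion
-- that carries the next lower bound as an accumulator (alternative decomposition, same O(n)).

-- ===== PORT A =====
-- Loop body of A (the enumerate iteration); all indexings are in range on the branch that
-- performs them, so they are ported with pyGetD (the default is never used).
def pvBodyA (velocity_layers : List (Int × String)) (p : Int × Int × String) : Int × Int × String :=
  let num_layers : Int := velocity_layers.length
  let i := p.1
  let velocity := p.2.1
  let file_path := p.2.2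
  let mm : Int × Int :=
    if i = 0 then
      if num_layers = 1 then (1, 127)
      else (1, PySem.Int.floordiv (velocity + (PySem.List.pyGetD velocity_layers (i + 1) (0, "")).1) 2)
    else if i = num_layers - 1 then
      (PySem.Int.floordiv ((PySem.List.pyGetD velocity_layers (i - 1) (0, "")).1 + velocity) 2 + 1, 127)
    else
      (PySem.Int.floordiv ((PySem.List.pyGetD velocity_layers (i - 1) (0, "")).1 + velocity) 2 + 1,
       PySem.Int.floordiv (velocity + (PySem.List.pyGetD velocity_layers (i + 1) (0, "")).1) 2)
  (mm.1, mm.2, file_path)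

def create_velocity_ranges (velocity_layers : List (Int × String)) : List (Int × Int × String) :=
  if velocity_layers = [] then []
  else (PySem.List.enumerate velocity_layers).foldl
        (fun ranges p => ranges ++ [pvBodyA velocity_layers p]) []

-- ===== PORT B =====
-- Source B's inner 'go': recursion over the layer list carrying vel_min; 'layers[0]'/'layers[1:]' become
-- the cons pattern (go is only called on nonempty lists; the [] case mirrors that it is unreachable).
def pvGo (vel_min : Int) : List (Int × String) → List (Int × Int × String)
  | [] => []
  | [(_, file_path)] => [(vel_min, 127, file_path)]
  | (velocity, file_path) :: (v2, s2) :: t =>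
    (vel_min, PySem.Int.floordiv (velocity + v2) 2, file_path)
      :: pvGo (PySem.Int.floordiv (velocity + v2) 2 + 1) ((v2, s2) :: t)

def create_velocity_ranges_alt (velocity_layers : List (Int × String)) : List (Int × Int × String) :=
  if velocity_layers = [] then [] else pvGo 1 velocity_layers

-- ===== PRECONDITION & SPEC =====
def Spec_create_velocity_ranges (velocity_layers : List (Int × String)) (out : List (Int × Int × String)) : Prop := out = create_velocity_ranges_alt velocity_layers
instance (velocity_layers : List (Int × String)) (out : List (Int × Int × String)) : Decidable (Spec_create_velocity_ranges velocity_layers out) := by unfold Spec_create_velocity_ranges; infer_instance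

-- ===== CLAIM (what is proved, stated in full; the proofs are below) =====
def Claim_equal_create_velocity_ranges : Prop := ∀ (velocity_layers : List (Int × String)), Dom_create_velocity_ranges velocity_layers → Spec_create_velocity_ranges velocity_layers (create_velocity_ranges velocity_layers)

-- ===== LEMMAS AND PROOFS =====

-- midpoint between layer j and layer j+1 (total, via getD)
def pvMid (l : List (Int × String)) (j : Nat) : Int :=
  PySem.Int.floordiv ((l.getD j (0, "")).1 + (l.getD (j + 1) (0, "")).1) 2

-- what element k of the result must be, with m the carried lower bound for index 0
def pvTriple (l : List (Int × String)) (m : Int) (k : Nat) : Int × Int × String :=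
  ((if k = 0 then m else pvMid l (k - 1) + 1),
   (if k = l.length - 1 then 127 else pvMid l k),
   (l.getD k (0, "")).2)

lemma pvGo_length (m : Int) (l : List (Int × String)) : (pvGo m l).length = l.length := by
  induction l generalizing m with
  | nil => simp [pvGo]
  | cons x rest ih =>
    obtain ⟨v, fp⟩ := x
    cases rest with
    | nil => simp [pvGo]
    | cons y t =>
      obtain ⟨v2, s2⟩ := y
      simp [pvGo, ih]

lemma pvGo_get (l : List (Int × String)) (m : Int) (k : Nat) (hk : k < l.length) :
    (pvGo m l)[k]'(by rw [pvGo_length]; exact hk) = pvTriple l m k := by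
  induction l generalizing m k with
  | nil => simp at hk
  | cons x rest ih =>
    obtain ⟨v, fp⟩ := x
    cases rest with
    | nil =>
      simp at hk
      subst hk
      simp [pvGo, pvTriple]
    | cons y t =>
      obtain ⟨v2, s2⟩ := y
      cases k with
      | zero =>
        have hne : ¬ ((0 : Nat) = ((v, fp) :: (v2, s2) :: t).length - 1) := by
          simp
        simp [pvGo, pvTriple, pvMid]
      | succ j =>
        have hj : j < ((v2, s2) :: t).length := by
          simp at hk ⊢; omega
        have := ih ((PySem.Int.floordiv (v + v2) 2) + 1) j hj
        have hget : (pvGo m ((v, fp) :: (v2, s2) :: t))[j + 1]'(by rw [pvGo_length]; exact hk)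
            = (pvGo (PySem.Int.floordiv (v + v2) 2 + 1) ((v2, s2) :: t))[j]'(by rw [pvGo_length]; exact hj) := by
          simp [pvGo]
        rw [hget, this]
        unfold pvTriple
        congr 1
        · -- vel_min component
          cases j with
          | zero => simp [pvMid]
          | succ i =>
            have h1 : ¬ (i + 1 = 0) := by omega
            have h2 : ¬ (i + 1 + 1 = 0) := by omega
            simp only [if_neg h1, if_neg h2]
            have : pvMid ((v, fp) :: (v2, s2) :: t) (i + 1 + 1 - 1) = pvMid ((v2, s2) :: t) (i + 1 - 1) := by
              simp [pvMid]
            rw [this]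
        · congr 1
          · -- vel_max component
            have hlen : ((v, fp) :: (v2, s2) :: t).length - 1 = ((v2, s2) :: t).length - 1 + 1 := by
              simp
            by_cases hlast : j = ((v2, s2) :: t).length - 1
            · simp [hlast]
            · have hl2 : ¬ (j + 1 = ((v, fp) :: (v2, s2) :: t).length - 1) := by
                simp only [List.length_cons] at hlast ⊢; omega
              simp only [if_neg hlast, if_neg hl2, pvMid, List.getD_cons_succ]

lemma getElem_enumerate {α : Type} (xs : List α) (s : Int) (k : Nat) (h : k < (PySem.List.enumerate xs s).length) (h' : k < xs.length) :
    (PySem.List.enumerate xs s)[k] = (s + k, xs[k]) := by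
  induction xs generalizing s k with
  | nil => simp at h'
  | cons x xs ih =>
    simp only [PySem.List.enumerate_cons]
    cases k with
    | zero => simp
    | succ k =>
      simp only [List.getElem_cons_succ]
      rw [ih (s + 1) k (by simpa [PySem.List.length_enumerate] using Nat.lt_of_succ_lt_succ (by simpa [PySem.List.length_enumerate] using h)) (Nat.lt_of_succ_lt_succ h')]
      push_cast; ring_nf

lemma pyGetD_nat (l : List (Int × String)) (j : Nat) (hj : j < l.length) (d : Int × String) :
    PySem.List.pyGetD l (j : Int) d = l[j] := by
  rw [PySem.List.pyGetD_natCast, List.getD_eq_getElem l d hj]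

lemma pvMid_eq (l : List (Int × String)) (j : Nat) (hj : j + 1 < l.length) :
    pvMid l j = PySem.Int.floordiv ((l[j]'(by omega)).1 + (l[j + 1]'hj).1) 2 := by
  unfold pvMid
  rw [List.getD_eq_getElem l _ (by omega : j < l.length), List.getD_eq_getElem l _ hj]

lemma body_eq (l : List (Int × String)) (k : Nat) (hk : k < l.length) :
    pvBodyA l ((k : Int), l[k]) = pvTriple l 1 k := by
  unfold pvBodyA pvTriple
  rw [List.getD_eq_getElem l _ hk]
  by_cases hk0 : k = 0
  · subst hk0
    by_cases hn1 : l.length = 1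
    · have h1 : ((l.length : Int)) = 1 := by omega
      have h2 : (0 : Nat) = l.length - 1 := by omega
      simp [h1, ← h2]
    · have h1 : ¬ ((l.length : Int)) = 1 := by omega
      have h0 : ¬ ((0 : Int) = (l.length : Int) - 1) := by omega
      have h0' : ¬ ((0 : Nat) = l.length - 1) := by omega
      have hp1 := pyGetD_nat l 1 (by omega) (0, "")
      have hm := pvMid_eq l 0 (by omega)
      simp only [Nat.cast_one] at hp1
      simp [h1, h0', hm, hp1]
  · have hke : ¬ ((k : Int) = 0) := by omega
    have hprev : ((k : Int) - 1) = ((k - 1 : Nat) : Int) := by omega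
    have hpm := pyGetD_nat l (k - 1) (by omega) (0, "")
    have hmp := pvMid_eq l (k - 1) (by omega)
    have hsub : k - 1 + 1 = k := by omega
    simp only [hsub] at hmp
    by_cases hkl : k = l.length - 1
    · have hl : ((k : Int)) = (l.length : Int) - 1 := by omega
      simp only [if_neg hke, if_pos hl, if_neg hk0, if_pos hkl]
      rw [hprev, hpm, hmp]
    · have hl : ¬ (((k : Int)) = (l.length : Int) - 1) := by omega
      have hmk := pvMid_eq l k (by omega)
      have hnext : ((k : Int) + 1) = ((k + 1 : Nat) : Int) := by push_cast; ring
      have hpn := pyGetD_nat l (k + 1) (by omega) (0, "")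
      simp only [if_neg hke, if_neg hl, if_neg hk0, if_neg hkl]
      rw [hprev, hnext, hpm, hpn, hmp, hmk]

-- ===== VERDICT (by name: the statement is the Claim_ definition above) =====
theorem create_velocity_ranges_spec : Claim_equal_create_velocity_ranges := by
  intro l _
  show create_velocity_ranges l = create_velocity_ranges_alt l
  by_cases hnil : l = []
  · subst hnil; rfl
  · unfold create_velocity_ranges create_velocity_ranges_alt
    rw [if_neg hnil, if_neg hnil,
        PySem.List.foldl_append_singleton_eq_map (pvBodyA l), List.nil_append]
    apply List.ext_getElem
    · simp [pvGo_length, PySem.List.length_enumerate]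
    · intro k h1 h2
      have hk : k < l.length := by rw [pvGo_length] at h2; exact h2
      simp only [List.getElem_map]
      rw [getElem_enumerate l 0 k (by simpa [PySem.List.length_enumerate] using hk) hk,
          zero_add, body_eq l k hk, pvGo_get l 1 k hk]
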